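-- pv_equiv track=rewrite | github.com/deepng/relearnInPublic | pythonML/FixedWindowSize.py | fixedWindowSize
-- ===== SOURCE A (Python) =====
-- def fixedWindowSize(nums: list[int], size: int) -> int:
--     max = 0
--     l = 0
--     r = size
--     while r < len(nums):
--         res = sum(nums[l:r])
--         if(max < res):
--             max = res
--         l += 1
--         r += 1
--     return max
-- ===== SOURCE B (Python) =====
-- def fixedWindowSize(nums: list[int], size: int) -> int:
--     best = 0
--     cur = sum(nums[:size])
--     for r in range(size, len(nums)):
--         if cur > best:
--             best = cur
--         cur += nums[r] - nums[r - size]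
--     return best
-- ===== Notes on version B (the rewrite author's own statement) =====
-- stated objective: faster
-- what changed: B maintains one incremental running window sum (add the element entering on the right, subtract the one leaving on the left) instead of recomputing sum(nums[l:r]) from scratch for every window; Pre_ excludes negative window sizes, on which A sums accidental negative-slice windows while B's plain indexing raises IndexError.
-- outside the precondition, e.g. on fixedWindowSize([1, 2, 3], -1): A returns 3, B raises IndexError
import Mathlib
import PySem

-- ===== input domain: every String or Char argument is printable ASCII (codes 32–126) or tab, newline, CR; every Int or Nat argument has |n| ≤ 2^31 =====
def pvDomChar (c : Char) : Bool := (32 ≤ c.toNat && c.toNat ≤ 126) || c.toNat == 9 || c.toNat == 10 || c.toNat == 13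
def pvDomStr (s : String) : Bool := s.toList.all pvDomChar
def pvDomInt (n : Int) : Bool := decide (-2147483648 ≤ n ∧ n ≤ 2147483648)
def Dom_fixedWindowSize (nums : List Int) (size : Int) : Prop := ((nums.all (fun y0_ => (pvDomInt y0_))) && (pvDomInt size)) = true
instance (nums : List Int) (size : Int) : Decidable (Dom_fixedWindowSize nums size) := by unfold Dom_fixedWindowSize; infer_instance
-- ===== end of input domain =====

-- B replaces A's per-window slice summation by one incremental running window sum (faster).

-- ===== PORT A =====
-- while r < len(nums): res = sum(nums[l:r]); if max < res: max = res; l += 1; r += 1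
def fixedWindowSizeLoop (nums : List Int) (mx l r : Int) : Int :=
  if _h : r < (nums.length : Int) then
    let res := (PySem.List.slice nums (some l) (some r)).sum
    fixedWindowSizeLoop nums (if mx < res then res else mx) (l + 1) (r + 1)
  else mx
termination_by ((nums.length : Int) - r).toNat
decreasing_by omega

def fixedWindowSize (nums : List Int) (size : Int) : Int :=
  fixedWindowSizeLoop nums 0 0 size

-- ===== PORT B =====
-- best = 0; cur = sum(nums[:size]); for r in range(size, len(nums)): if cur > best: best = cur;
-- cur += nums[r] - nums[r - size]; return best.  Under Pre_ (0 ≤ size) the indices r and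
-- r - size are always in range inside the loop, so pyGetD's default is never used.
def fixedWindowSize_alt (nums : List Int) (size : Int) : Int :=
  let cur := (PySem.List.slice nums none (some size)).sum
  let p := (PySem.List.pyRange size (nums.length : Int) 1).foldl
    (fun (st : Int × Int) r =>
      (st.1 + PySem.List.pyGetD nums r 0 - PySem.List.pyGetD nums (r - size) 0,
       if st.1 > st.2 then st.1 else st.2)) (cur, 0)
  p.2

-- ===== PRECONDITION & SPEC =====
-- Pre_ excludes negative window sizes, on which A sums accidental negative-slice
-- windows while B's plain indexing raises IndexError.
def Pre_fixedWindowSize (_nums : List Int) (size : Int) : Prop := 0 ≤ size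
instance (nums : List Int) (size : Int) : Decidable (Pre_fixedWindowSize nums size) := by unfold Pre_fixedWindowSize; infer_instance

def pvWitness_fixedWindowSize : List Int × Int := ([1, -2, 3, 4], 2)

def Spec_fixedWindowSize (nums : List Int) (size : Int) (out : Int) : Prop := out = fixedWindowSize_alt nums size
instance (nums : List Int) (size : Int) (out : Int) : Decidable (Spec_fixedWindowSize nums size out) := by unfold Spec_fixedWindowSize; infer_instance

-- ===== CLAIM (what is proved, stated in full; the proofs are below) =====
def Claim_equal_fixedWindowSize : Prop := ∀ (nums : List Int) (size : Int), Dom_fixedWindowSize nums size → Pre_fixedWindowSize nums size → Spec_fixedWindowSize nums size (fixedWindowSize nums size)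

-- ===== LEMMAS AND PROOFS =====

-- sum of the window of length k starting at l
def wsum (nums : List Int) (k l : Nat) : Int := ((nums.drop l).take k).sum

-- A's max-update
def gmax (mx res : Int) : Int := if mx < res then res else mx

theorem loopA (nums : List Int) (k : Nat) :
    ∀ (c l : Nat) (mx : Int), nums.length - (l + k) = c →
      fixedWindowSizeLoop nums mx (l : Int) ((l : Int) + (k : Int)) =
        (List.range' l c).foldl (fun mx l' => gmax mx (wsum nums k l')) mx := by
  intro c
  induction c with
  | zero =>
      intro l mx h
      rw [fixedWindowSizeLoop]
      have : ¬ ((l : Int) + (k : Int) < (nums.length : Int)) := by omega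
      simp [this]
  | succ c ih =>
      intro l mx h
      rw [fixedWindowSizeLoop]
      have hlt : ((l : Int) + (k : Int) < (nums.length : Int)) := by omega
      simp only [hlt, dif_pos, List.range'_succ, List.foldl_cons]
      have hslice : PySem.List.slice nums (some (l : Int)) (some ((l : Int) + (k : Int))) =
          (nums.drop l).take k := PySem.List.slice_natCast_add nums l k
      have hrec := ih (l + 1) (gmax mx (wsum nums k l)) (by omega)
      have harg1 : ((l : Int) + 1) = (((l + 1 : Nat) : Int)) := by push_cast; ring
      have harg2 : ((l : Int) + (k : Int) + 1) = (((l + 1 : Nat) : Int) + (k : Int)) := by push_cast; ring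
      rw [hslice, harg1, harg2]
      exact hrec

theorem slide (nums : List Int) (k l : Nat) (h : l + k < nums.length) :
    wsum nums k (l + 1) = wsum nums k l + nums[l + k]'h - nums[l]'(by omega) := by
  have hl : l < nums.length := by omega
  have h1 : (nums.drop l).take (k + 1) = nums[l] :: (nums.drop (l + 1)).take k := by
    rw [List.drop_eq_getElem_cons hl, List.take_succ_cons]
  have h2 : (nums.drop l).take (k + 1) = (nums.drop l).take k ++ [nums[l + k]] := by
    rw [List.take_add_one]
    congr 1
    have : (nums.drop l)[k]? = some nums[l + k] := by
      rw [List.getElem?_drop]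
      exact List.getElem?_eq_getElem (by omega)
    simp [this]
  have := congrArg List.sum h1
  rw [h2] at this
  simp [wsum, List.sum_append] at this ⊢
  omega

theorem loopB (nums : List Int) (k : Nat) :
    ∀ (t l : Nat) (b : Int), l + t + k ≤ nums.length →
      ((List.range' (l + k) t).map (fun j : Nat => (j : Int))).foldl
        (fun (st : Int × Int) r =>
          (st.1 + PySem.List.pyGetD nums r 0 - PySem.List.pyGetD nums (r - (k : Int)) 0,
           if st.1 > st.2 then st.1 else st.2)) (wsum nums k l, b) =
      (wsum nums k (l + t), (List.range' l t).foldl (fun b j => gmax b (wsum nums k j)) b) := by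
  intro t
  induction t with
  | zero => intro l b _; simp
  | succ t ih =>
      intro l b hb
      rw [List.range'_succ, List.map_cons, List.foldl_cons]
      have hlk : l + k < nums.length := by omega
      have hga : PySem.List.pyGetD nums (((l + k : Nat) : Int)) 0 = nums[l + k]'hlk := by
        rw [PySem.List.pyGetD_natCast]
        exact List.getD_eq_getElem _ _ hlk
      have hgb : PySem.List.pyGetD nums ((((l + k : Nat)) : Int) - (k : Int)) 0 = nums[l]'(by omega) := by
        have : (((l + k : Nat)) : Int) - (k : Int) = ((l : Nat) : Int) := by push_cast; ring
        rw [this, PySem.List.pyGetD_natCast]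
        exact List.getD_eq_getElem _ _ (by omega)
      have hcur : wsum nums k l + PySem.List.pyGetD nums (((l + k : Nat) : Int)) 0 -
          PySem.List.pyGetD nums ((((l + k : Nat)) : Int) - (k : Int)) 0 = wsum nums k (l + 1) := by
        rw [hga, hgb, slide nums k l hlk]
      simp only [hcur]
      have hbest : (if wsum nums k l > b then wsum nums k l else b) = gmax b (wsum nums k l) := by
        unfold gmax
        by_cases hc : b < wsum nums k l <;> simp [hc]
      have hrange : List.range' (l + k + 1) t = List.range' ((l + 1) + k) t := by
        congr 1; omega
      rw [hbest, hrange]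
      have hrec := ih (l + 1) (gmax b (wsum nums k l)) (by omega)
      rw [hrec]
      have h3 : l + 1 + t = l + (t + 1) := by omega
      rw [h3, List.range'_succ, List.foldl_cons]

-- ===== VERDICT (by name: the statement is the Claim_ definition above) =====
theorem fixedWindowSize_spec : Claim_equal_fixedWindowSize := by
  intro nums size _hdom hpre
  unfold Spec_fixedWindowSize fixedWindowSize fixedWindowSize_alt
  obtain ⟨k, rfl⟩ := Int.eq_ofNat_of_zero_le hpre
  have hslice : (PySem.List.slice nums none (some ((k : Int)))).sum = wsum nums k 0 := by
    rw [PySem.List.slice_to_natCast]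
    simp [wsum]
  by_cases hk : k ≤ nums.length
  · set t := nums.length - k with ht
    -- A side
    have hA := loopA nums k t 0 0 (by omega)
    rw [show ((0 : Nat) : Int) + (k : Int) = (k : Int) by simp, Nat.cast_zero] at hA
    rw [hA]
    -- B side: pyRange size n 1 = (range' k t).map cast
    have hrange : PySem.List.pyRange (k : Int) (nums.length : Int) 1 =
        (List.range' (0 + k) t).map (fun j : Nat => (j : Int)) := by
      rw [PySem.List.pyRange_one]
      have htn : ((nums.length : Int) - (k : Int)).toNat = t := by omega
      rw [htn, List.range'_eq_map_range]
      simp [List.map_map, Function.comp]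
    simp only [hrange, hslice]
    have hB := loopB nums k t 0 0 (by omega)
    rw [hB]
  · -- size > len(nums): no window on either side
    have hA : fixedWindowSizeLoop nums 0 0 (k : Int) = 0 := by
      rw [fixedWindowSizeLoop]
      have : ¬ ((k : Int) < (nums.length : Int)) := by
        omega
      simp [this]
    have hrange : PySem.List.pyRange (k : Int) (nums.length : Int) 1 = [] := by
      rw [PySem.List.pyRange_one]
      have : ((nums.length : Int) - (k : Int)).toNat = 0 := by omega
      rw [this]
      simp
    simp [hA, hrange]
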